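-- pv_equiv track=rewrite | github.com/Shubbhang351/PYTHON | final_prog/assignment/pie.py | solve
-- ===== SOURCE A (Python) =====
-- def solve(s,i,indi,ans):
--     if i == len(s):
--         return ans
--
--     if indi == 'p':
--         if s[i] == 'i':
--             return solve(s,i + 1,s[i] , ans + "3.14")
--         elif s[i] == 'p':
--             return solve(s,i + 1,s[i],ans + 'p')
--         else:
--             return solve(s,i + 1,s[i],ans + 'p' + s[i])
--     elif s[i] == 'p':
--         return solve(s, i + 1,s[i],ans)
--     else:
--         return solve(s,i + 1,s[i],ans + s[i])
-- ===== SOURCE B (Python) =====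
-- def solve(s, i, indi, ans):
--     out = [ans]
--     pending = (indi == 'p')
--     while i < len(s):
--         c = s[i]
--         i += 1
--         if c == 'p':
--             if pending:
--                 out.append('p')
--             pending = True
--         elif pending:
--             out.append('3.14' if c == 'i' else 'p' + c)
--             pending = False
--         else:
--             out.append(c)
--     return ''.join(out)
-- ===== Notes on version B (the rewrite author's own statement) =====
-- stated objective: faster
-- what changed: B replaces A's tail recursion, which carries the previous character as a string and rebuilds the answer by string concatenation at every step, with an iterative while-loop state machine: a boolean pending-'p' flag and a list of output pieces joined once at the end; Pre_ excludes only inputs where A raises IndexError (start index out of range).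
import Mathlib
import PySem

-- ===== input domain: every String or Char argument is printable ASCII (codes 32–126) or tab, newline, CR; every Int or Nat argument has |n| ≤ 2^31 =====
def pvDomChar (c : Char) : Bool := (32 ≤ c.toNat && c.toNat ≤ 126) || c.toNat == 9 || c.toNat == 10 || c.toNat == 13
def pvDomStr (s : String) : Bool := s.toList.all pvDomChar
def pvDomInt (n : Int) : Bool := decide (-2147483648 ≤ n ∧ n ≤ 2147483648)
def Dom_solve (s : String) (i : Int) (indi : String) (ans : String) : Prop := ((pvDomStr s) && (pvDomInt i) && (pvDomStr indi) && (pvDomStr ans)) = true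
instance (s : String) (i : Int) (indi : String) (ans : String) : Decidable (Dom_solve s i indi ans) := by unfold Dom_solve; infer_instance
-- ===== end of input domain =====

-- B replaces A's tail recursion (previous-char string as state, quadratic string concatenation)
-- by an iterative scan with a boolean pending-'p' flag and a list of pieces joined once at the end.

-- needed by 'solve' for termination (cited in decreasing_by)
theorem pv_lt_of_pyGet?_some {s : String} {i : Int} {c : Char}
    (h : PySem.Str.pyGet? s i = some c) : i < (s.length : Int) := by
  by_contra hlt
  have hn : PySem.List.pyGet? s.toList i = none := by
    rw [PySem.List.pyGet?_eq_none_iff]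
    intro hr
    exact hlt (by simpa using hr.2)
  have h' : PySem.List.pyGet? s.toList i = some c := by simpa using h
  rw [h'] at hn; cases hn

-- ===== PORT A =====
def solve (s : String) (i : Int) (indi : String) (ans : String) : String :=
  if i == (s.length : Int) then ans
  else
    match h : PySem.Str.pyGet? s i with
    | none => ""   -- Python raises IndexError here; excluded by Pre_solve
    | some c =>
      if indi == "p" then
        if c == 'i' then solve s (i + 1) (String.ofList [c]) (ans ++ "3.14")
        else if c == 'p' then solve s (i + 1) (String.ofList [c]) (ans ++ "p")
        else solve s (i + 1) (String.ofList [c]) (ans ++ "p" ++ String.ofList [c])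
      else if c == 'p' then solve s (i + 1) (String.ofList [c]) ans
      else solve s (i + 1) (String.ofList [c]) (ans ++ String.ofList [c])
termination_by ((s.length : Int) - i).toNat
decreasing_by
  all_goals
    have := pv_lt_of_pyGet?_some h
    omega

-- ===== PORT B =====
-- the 'while i < len(s)' loop of Source B, state = (pending, out)
def solveAltLoop (s : String) (i : Int) (pending : Bool) (out : List String) : List String :=
  if h : i < (s.length : Int) then
    match PySem.Str.pyGet? s i with
    | none => []   -- Python raises IndexError here; excluded by Pre_solve
    | some c =>
      if c == 'p' then
        solveAltLoop s (i + 1) true (if pending then out ++ ["p"] else out)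
      else if pending then
        solveAltLoop s (i + 1) false (out ++ [if c == 'i' then "3.14" else String.ofList ['p', c]])
      else
        solveAltLoop s (i + 1) pending (out ++ [String.ofList [c]])
  else out
termination_by ((s.length : Int) - i).toNat
decreasing_by all_goals omega

def solve_alt (s : String) (i : Int) (indi : String) (ans : String) : String :=
  PySem.Str.join "" (solveAltLoop s i (indi == "p") [ans])

-- ===== PRECONDITION & SPEC =====
-- exactly the inputs on which A's recursion reaches i == len(s) without an out-of-range s[i]
def Pre_solve (s : String) (i : Int) (indi : String) (ans : String) : Prop :=
  -(s.length : Int) ≤ i ∧ i ≤ (s.length : Int)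
instance (s : String) (i : Int) (indi : String) (ans : String) : Decidable (Pre_solve s i indi ans) := by unfold Pre_solve; infer_instance

def pvWitness_solve : String × Int × String × String := ("pipxp", 0, "", "")

def Spec_solve (s : String) (i : Int) (indi : String) (ans : String) (out : String) : Prop := out = solve_alt s i indi ans
instance (s : String) (i : Int) (indi : String) (ans : String) (out : String) : Decidable (Spec_solve s i indi ans out) := by unfold Spec_solve; infer_instance

-- ===== CLAIM (what is proved, stated in full; the proofs are below) =====
def Claim_equal_solve : Prop := ∀ (s : String) (i : Int) (indi : String) (ans : String), Dom_solve s i indi ans → Pre_solve s i indi ans → Spec_solve s i indi ans (solve s i indi ans)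

-- ===== LEMMAS AND PROOFS =====

-- the characters A (and B) visit starting at index i
def pvProc (s : String) (i : Int) : List Char :=
  if 0 ≤ i then s.toList.drop i.toNat
  else s.toList.drop (s.toList.length + i).toNat ++ s.toList

-- A's loop, abstracted over the visited characters and a pending-'p' flag
def pvG : List Char → Bool → String → String
  | [], _, ans => ans
  | c :: cs, pend, ans =>
    if pend then
      if c == 'i' then pvG cs (c == 'p') (ans ++ "3.14")
      else if c == 'p' then pvG cs (c == 'p') (ans ++ "p")
      else pvG cs (c == 'p') (ans ++ "p" ++ String.ofList [c])
    else if c == 'p' then pvG cs (c == 'p') ans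
    else pvG cs (c == 'p') (ans ++ String.ofList [c])

-- B's loop, abstracted over the visited characters
def pvH : List Char → Bool → List String → List String
  | [], _, out => out
  | c :: cs, pending, out =>
    if c == 'p' then pvH cs true (if pending then out ++ ["p"] else out)
    else if pending then pvH cs false (out ++ [if c == 'i' then "3.14" else String.ofList ['p', c]])
    else pvH cs pending (out ++ [String.ofList [c]])

theorem pv_singleton_beq (c : Char) : (String.ofList [c] == "p") = (c == 'p') := by
  by_cases h : c = 'p'
  · subst h; rfl
  · have : String.ofList [c] ≠ "p" := by
      intro hcon
      have := String.toList_inj.mpr hcon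
      simp at this
      exact h this
    simp [beq_eq_decide, h, this]

theorem pvProc_cons (s : String) (i : Int)
    (h1 : -(s.length : Int) ≤ i) (h2 : i < (s.length : Int)) :
    ∃ c, PySem.Str.pyGet? s i = some c ∧ pvProc s i = c :: pvProc s (i + 1) := by
  have hlen : s.length = s.toList.length := by simp
  by_cases h0 : 0 ≤ i
  · have hi : i.toNat < s.toList.length := by omega
    refine ⟨s.toList[i.toNat], ?_, ?_⟩
    · simp only [PySem.Str.pyGet?_eq, PySem.Chars.pyGet?_eq_listPyGet?]
      rw [PySem.List.pyGet?_of_nonneg (xs := s.toList) h0]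
      simp [List.getElem?_eq_getElem hi]
    · unfold pvProc
      rw [if_pos h0, if_pos (by omega)]
      rw [List.drop_eq_getElem_cons hi]
      have e : (i + 1).toNat = i.toNat + 1 := by omega
      rw [e]
  · have hk : i = -(((-i).toNat : Nat) : Int) := by omega
    have hkpos : 0 < (-i).toNat := by omega
    have hkle : (-i).toNat ≤ s.toList.length := by omega
    have hidx : s.toList.length - (-i).toNat < s.toList.length := by omega
    refine ⟨s.toList[s.toList.length - (-i).toNat], ?_, ?_⟩
    · have hres : PySem.List.pyGet? s.toList i = s.toList[s.toList.length - (-i).toNat]? := by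
        conv_lhs => rw [hk]
        rw [PySem.List.pyGet?_neg_natCast _ _ hkpos hkle]
      simp only [PySem.Str.pyGet?_eq, PySem.Chars.pyGet?_eq_listPyGet?]
      rw [hres]
      simp [List.getElem?_eq_getElem hidx]
    · by_cases h1' : i + 1 < 0
      · unfold pvProc
        rw [if_neg (by omega), if_neg (by omega)]
        have e1 : (↑s.toList.length + i).toNat = s.toList.length - (-i).toNat := by omega
        have e2 : (↑s.toList.length + (i+1)).toNat = (s.toList.length - (-i).toNat) + 1 := by omega
        rw [e1, e2, List.drop_eq_getElem_cons hidx]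
        simp only [List.cons_append]
      · -- i = -1, so i + 1 = 0
        have hi1 : i = -1 := by omega
        subst hi1
        unfold pvProc
        rw [if_neg (by omega), if_pos (by omega)]
        have e1 : (↑s.toList.length + (-1 : Int)).toNat = s.toList.length - 1 := by omega
        have e2 : ((-1 : Int) + 1).toNat = 0 := by omega
        rw [e1, e2]
        have hidx' : s.toList.length - 1 < s.toList.length := by omega
        rw [List.drop_eq_getElem_cons hidx']
        have e4 : List.drop ((s.toList.length - 1) + 1) s.toList = [] := by
          apply List.drop_eq_nil_of_le; omega
        rw [e4]
        simp

theorem pvProc_at_len (s : String) : pvProc s (s.length : Int) = [] := by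
  unfold pvProc
  rw [if_pos (by omega)]
  apply List.drop_eq_nil_of_le
  have : s.length = s.toList.length := by simp
  omega

theorem solve_eq_pvG (s : String) : ∀ (n : Nat) (i : Int) (indi ans : String),
    ((s.length : Int) - i).toNat ≤ n → -(s.length : Int) ≤ i → i ≤ (s.length : Int) →
    solve s i indi ans = pvG (pvProc s i) (indi == "p") ans := by
  intro n
  induction n with
  | zero =>
    intro i indi ans hm h1 h2
    have hi : i = (s.length : Int) := by omega
    subst hi
    rw [solve]
    simp only [BEq.rfl, if_true]
    rw [pvProc_at_len, pvG]
  | succ n ih =>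
    intro i indi ans hm h1 h2
    by_cases hi : i = (s.length : Int)
    · subst hi
      rw [solve]
      simp only [BEq.rfl, if_true]
      rw [pvProc_at_len, pvG]
    · have hlt : i < (s.length : Int) := by omega
      obtain ⟨c, hc, hp⟩ := pvProc_cons s i h1 hlt
      rw [solve]
      rw [if_neg (by simpa using hi)]
      rw [hp, pvG]
      split
      · next hmatch => rw [hc] at hmatch; cases hmatch
      · next c' hmatch =>
        rw [hc] at hmatch
        injection hmatch with hcc
        subst hcc
        have hrec : ∀ (indi' ans' : String),
            solve s (i+1) indi' ans' = pvG (pvProc s (i+1)) (indi' == "p") ans' := by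
          intro indi' ans'
          exact ih (i+1) indi' ans' (by omega) (by omega) (by omega)
        by_cases hind : (indi == "p") = true
        · rw [if_pos hind, if_pos hind]
          by_cases hci : (c == 'i') = true
          · rw [if_pos hci, if_pos hci, hrec, pv_singleton_beq]
          · rw [if_neg hci, if_neg hci]
            by_cases hcp : (c == 'p') = true
            · rw [if_pos hcp, if_pos hcp, hrec, pv_singleton_beq]
            · rw [if_neg hcp, if_neg hcp, hrec, pv_singleton_beq]
        · rw [if_neg hind, if_neg hind]
          by_cases hcp : (c == 'p') = true
          · rw [if_pos hcp, if_pos hcp, hrec, pv_singleton_beq]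
          · rw [if_neg hcp, if_neg hcp, hrec, pv_singleton_beq]

theorem solveAltLoop_eq_pvH (s : String) : ∀ (n : Nat) (i : Int) (pending : Bool) (out : List String),
    ((s.length : Int) - i).toNat ≤ n → -(s.length : Int) ≤ i → i ≤ (s.length : Int) →
    solveAltLoop s i pending out = pvH (pvProc s i) pending out := by
  intro n
  induction n with
  | zero =>
    intro i pending out hm h1 h2
    have hi : i = (s.length : Int) := by omega
    subst hi
    rw [solveAltLoop]
    rw [dif_neg (by omega)]
    rw [pvProc_at_len, pvH]
  | succ n ih =>
    intro i pending out hm h1 h2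
    by_cases hi : i = (s.length : Int)
    · subst hi
      rw [solveAltLoop]
      rw [dif_neg (by omega)]
      rw [pvProc_at_len, pvH]
    · have hlt : i < (s.length : Int) := by omega
      obtain ⟨c, hc, hp⟩ := pvProc_cons s i h1 hlt
      rw [solveAltLoop]
      rw [dif_pos hlt]
      rw [hp, pvH]
      split
      · next hmatch => rw [hc] at hmatch; cases hmatch
      · next c' hmatch =>
        rw [hc] at hmatch
        injection hmatch with hcc
        subst hcc
        have hrec : ∀ (pend' : Bool) (out' : List String),
            solveAltLoop s (i+1) pend' out' = pvH (pvProc s (i+1)) pend' out' := by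
          intro pend' out'
          exact ih (i+1) pend' out' (by omega) (by omega) (by omega)
        by_cases hcp : (c == 'p') = true
        · rw [if_pos hcp, if_pos hcp, hrec]
        · rw [if_neg hcp, if_neg hcp]
          by_cases hpd : pending = true
          · rw [if_pos hpd, if_pos hpd, hrec]
          · rw [if_neg hpd, if_neg hpd, hrec]

theorem pv_cjoin_append (ps : List (List Char)) (q : List Char) :
    PySem.Chars.join [] (ps ++ [q]) = PySem.Chars.join [] ps ++ q := by
  induction ps with
  | nil => rw [PySem.Chars.join_nil]; simp [PySem.Chars.join_singleton]
  | cons p ps ih =>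
    match ps with
    | [] =>
      rw [PySem.Chars.join_singleton]
      simp only [List.cons_append, List.nil_append]
      rw [PySem.Chars.join_cons_cons, PySem.Chars.join_singleton]
      simp
    | r :: rs =>
      simp only [List.cons_append] at ih ⊢
      rw [PySem.Chars.join_cons_cons, PySem.Chars.join_cons_cons, ih]
      simp

theorem pv_join_append (out : List String) (x : String) :
    PySem.Str.join "" (out ++ [x]) = PySem.Str.join "" out ++ x := by
  apply String.ext
  simp only [PySem.Str.toList_join, String.toList_append, List.map_append, List.map_cons,
    List.map_nil]
  have := pv_cjoin_append (out.map String.toList) x.toList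
  simpa using this

theorem pv_join_single (x : String) : PySem.Str.join "" [x] = x := by
  apply String.ext
  simp only [PySem.Str.toList_join, List.map_cons, List.map_nil]
  rw [PySem.Chars.join_singleton]

theorem pvH_join : ∀ (cs : List Char) (pend : Bool) (out : List String),
    PySem.Str.join "" (pvH cs pend out) = pvG cs pend (PySem.Str.join "" out) := by
  intro cs
  induction cs with
  | nil => intro pend out; rw [pvH, pvG]
  | cons c cs ih =>
    intro pend out
    rw [pvH, pvG]
    by_cases hcp : (c == 'p') = true
    · rw [if_pos hcp]
      have hc : c = 'p' := by simpa using hcp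
      subst hc
      by_cases hpd : pend = true
      · rw [if_pos hpd, hpd, if_pos rfl, if_neg (by decide), if_pos (by decide), ih,
          pv_join_append, show (('p' : Char) == 'p') = true from by decide]
      · have : pend = false := by simpa using hpd
        subst this
        simp only [Bool.false_eq_true, if_false, if_pos (by decide : (('p':Char) == 'p') = true)]
        rw [ih, show (('p' : Char) == 'p') = true from by decide]
    · rw [if_neg hcp]
      have hb : (c == 'p') = false := by simpa using hcp
      by_cases hpd : pend = true
      · subst hpd
        rw [if_pos rfl, if_pos rfl, ih, pv_join_append]
        by_cases hci : (c == 'i') = true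
        · rw [if_pos hci, if_pos hci, hb]
        · rw [if_neg hci, if_neg hci, if_neg hcp, hb]
          congr 1
          apply String.ext
          simp
      · have : pend = false := by simpa using hpd
        subst this
        simp only [Bool.false_eq_true, if_false]
        rw [if_neg hcp, ih, pv_join_append, hb]

theorem solve_alt_eq_pvG (s : String) (i : Int) (indi ans : String)
    (h1 : -(s.length : Int) ≤ i) (h2 : i ≤ (s.length : Int)) :
    solve_alt s i indi ans = pvG (pvProc s i) (indi == "p") ans := by
  unfold solve_alt
  rw [solveAltLoop_eq_pvH s ((s.length : Int) - i).toNat i _ _ le_rfl h1 h2, pvH_join,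
    pv_join_single]

-- ===== VERDICT (by name: the statement is the Claim_ definition above) =====
theorem solve_spec : Claim_equal_solve := by
  intro s i indi ans _ hpre
  obtain ⟨h1, h2⟩ := hpre
  unfold Spec_solve
  rw [solve_eq_pvG s ((s.length : Int) - i).toNat i indi ans le_rfl h1 h2,
    solve_alt_eq_pvG s i indi ans h1 h2]
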